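-- pv_equiv track=rewrite | github.com/canada-ca/tracker | data/processing.py | total_preloading_report
-- ===== SOURCE A (Python) =====
-- def total_preloading_report(eligible):
--     total_report = {"eligible": len(eligible), "preloaded": 0, "preload_ready": 0}
--
--     # Tally preloaded and preload-ready
--     for report in eligible:
--         # We consider *every* domain eligible for preloading,
--         # so there may be no pshtt data for some.
--         if report.get("preloaded") is None:
--             continue
--
--         if report["preloaded"] == 1:
--             total_report["preload_ready"] += 1
--         elif report["preloaded"] == 2:
--             total_report["preloaded"] += 1
--
--     return total_report
-- ===== SOURCE B (Python) =====
-- def total_preloading_report(eligible):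
--     # Extract the 'preloaded' values once, then count each bucket with
--     # staged list.count passes -- no accumulator loop, no branching.
--     values = [report.get("preloaded") for report in eligible]
--     return {
--         "eligible": len(values),
--         "preloaded": values.count(2),
--         "preload_ready": values.count(1),
--     }
-- ===== Notes on version B (the rewrite author's own statement) =====
-- stated objective: idiomatic
-- what changed: B projects the 'preloaded' values into a list once and computes each tally by a separate list.count pass, eliminating A's single branching accumulator loop entirely.
import Mathlib
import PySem

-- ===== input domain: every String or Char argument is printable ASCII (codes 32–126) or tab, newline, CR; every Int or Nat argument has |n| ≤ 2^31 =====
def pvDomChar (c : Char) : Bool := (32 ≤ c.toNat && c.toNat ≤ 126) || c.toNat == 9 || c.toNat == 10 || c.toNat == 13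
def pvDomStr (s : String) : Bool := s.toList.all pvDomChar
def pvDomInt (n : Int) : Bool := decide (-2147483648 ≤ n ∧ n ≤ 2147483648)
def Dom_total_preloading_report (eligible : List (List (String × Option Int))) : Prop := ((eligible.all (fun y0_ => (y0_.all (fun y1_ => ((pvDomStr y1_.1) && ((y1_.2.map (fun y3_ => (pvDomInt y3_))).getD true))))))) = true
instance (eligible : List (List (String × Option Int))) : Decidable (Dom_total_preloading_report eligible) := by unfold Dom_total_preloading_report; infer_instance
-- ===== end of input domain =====

-- B replaces A's branching accumulator loop by a value projection plus two list.count passes (idiomatic; same cost).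

-- ===== PORT A =====
-- report.get("preloaded"): missing key and a stored None both give Python None → .join
def pvGetPreloaded (report : List (String × Option Int)) : Option Int :=
  ((PySem.Dict.ofList report).get? "preloaded").join

-- the body of A's for-loop
def pvStepA (d : PySem.Dict String Int) (report : List (String × Option Int)) : PySem.Dict String Int :=
  match pvGetPreloaded report with
  | none => d
  | some v =>
    if v = 1 then d.modify "preload_ready" 0 (· + 1)
    else if v = 2 then d.modify "preloaded" 0 (· + 1)
    else d

def total_preloading_report (eligible : List (List (String × Option Int))) : List (String × Int) :=
  ((eligible.foldl pvStepA
    ((((PySem.Dict.empty).insert "eligible" (eligible.length : Int)).insert "preloaded" 0).insert "preload_ready" 0))).items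

-- ===== PORT B =====
-- values = [report.get("preloaded") for report in eligible]; the two tallies are values.count(2) / values.count(1)
def total_preloading_report_alt (eligible : List (List (String × Option Int))) : List (String × Int) :=
  let values := eligible.map pvGetPreloaded
  [("eligible", (values.length : Int)),
   ("preloaded", (PySem.List.count values (some 2) : Int)),
   ("preload_ready", (PySem.List.count values (some 1) : Int))]

-- ===== PRECONDITION & SPEC =====
def Spec_total_preloading_report (eligible : List (List (String × Option Int))) (out : List (String × Int)) : Prop := out = total_preloading_report_alt eligible
instance (eligible : List (List (String × Option Int))) (out : List (String × Int)) : Decidable (Spec_total_preloading_report eligible out) := by unfold Spec_total_preloading_report; infer_instance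

-- ===== CLAIM (what is proved, stated in full; the proofs are below) =====
def Claim_equal_total_preloading_report : Prop := ∀ (eligible : List (List (String × Option Int))), Dom_total_preloading_report eligible → Spec_total_preloading_report eligible (total_preloading_report eligible)

-- ===== LEMMAS AND PROOFS =====

theorem pvModifyPR (n p r : Int) :
    (PySem.Dict.mk [("eligible", n), ("preloaded", p), ("preload_ready", r)]).modify "preload_ready" 0 (· + 1)
      = PySem.Dict.mk [("eligible", n), ("preloaded", p), ("preload_ready", r + 1)] := by
  simp [PySem.Dict.modify, PySem.Dict.insert, PySem.Dict.getD, PySem.Dict.get?, PySem.Dict.contains]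

theorem pvModifyP (n p r : Int) :
    (PySem.Dict.mk [("eligible", n), ("preloaded", p), ("preload_ready", r)]).modify "preloaded" 0 (· + 1)
      = PySem.Dict.mk [("eligible", n), ("preloaded", p + 1), ("preload_ready", r)] := by
  simp [PySem.Dict.modify, PySem.Dict.insert, PySem.Dict.getD, PySem.Dict.get?, PySem.Dict.contains]

-- A's loop, started from the three-key literal dict, adds the tallies of values 2 and 1.
theorem pvFoldA (es : List (List (String × Option Int))) (n p r : Int) :
    es.foldl pvStepA (PySem.Dict.mk [("eligible", n), ("preloaded", p), ("preload_ready", r)]) =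
    PySem.Dict.mk [("eligible", n),
      ("preloaded", p + ((es.map pvGetPreloaded).count (some 2) : Int)),
      ("preload_ready", r + ((es.map pvGetPreloaded).count (some 1) : Int))] := by
  induction es generalizing p r with
  | nil => simp
  | cons e es ih =>
    simp only [List.foldl_cons, List.map_cons, List.count_cons]
    cases hv : pvGetPreloaded e with
    | none =>
      simp only [pvStepA, hv]
      rw [ih]
      simp
    | some v =>
      simp only [pvStepA, hv]
      by_cases h1 : v = 1
      · subst h1
        rw [if_pos rfl, pvModifyPR, ih]
        simp
        ring
      · by_cases h2 : v = 2
        · subst h2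
          rw [if_neg h1, if_pos rfl, pvModifyP, ih]
          simp
          ring
        · rw [if_neg h1, if_neg h2, ih]
          have e1 : ((some v : Option Int) == some 1) = false := by simp [h1]
          have e2 : ((some v : Option Int) == some 2) = false := by simp [h2]
          simp [e1, e2]

-- ===== VERDICT (by name: the statement is the Claim_ definition above) =====
theorem total_preloading_report_spec : Claim_equal_total_preloading_report := by
  intro eligible _
  unfold Spec_total_preloading_report total_preloading_report total_preloading_report_alt
  have hinit : (((PySem.Dict.empty).insert "eligible" (eligible.length : Int)).insert "preloaded" 0).insert "preload_ready" 0
      = PySem.Dict.mk [("eligible", (eligible.length : Int)), ("preloaded", 0), ("preload_ready", (0 : Int))] := rfl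
  rw [hinit, pvFoldA]
  simp [PySem.List.count_eq]
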